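-- pv_equiv track=rewrite | github.com/Pedro-Jose-da-Rocha-Mendonca/Devflow | tooling/scripts/memory_summarize.py | categorize_entry
-- ===== SOURCE A (Python) =====
-- def categorize_entry(content: str) -> str:
--     """Categorize a memory entry by its content."""
--     content_lower = content.lower()
--
--     # Error/bug related
--     if any(word in content_lower for word in ["error", "bug", "fix", "crash", "issue", "fail"]):
--         return "errors"
--
--     # Preference/style related
--     if any(
--         word in content_lower for word in ["prefer", "style", "convention", "pattern", "approach"]
--     ):
--         return "preferences"
--
--     # Code/implementation related
--     if any(
--         word in content_lower
--         for word in ["implement", "code", "function", "class", "module", "file"]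
--     ):
--         return "implementation"
--
--     # Testing related
--     if any(word in content_lower for word in ["test", "spec", "coverage", "assert"]):
--         return "testing"
--
--     # Architecture/design related
--     if any(
--         word in content_lower for word in ["architect", "design", "structure", "pattern", "layer"]
--     ):
--         return "architecture"
--
--     # Performance related
--     if any(
--         word in content_lower
--         for word in ["performance", "optimize", "slow", "fast", "memory", "cache"]
--     ):
--         return "performance"
--
--     # Documentation related
--     if any(word in content_lower for word in ["doc", "readme", "comment", "explain"]):
--         return "documentation"
--
--     return "general"
-- ===== SOURCE B (Python) =====
-- KEYWORD_PRIORITY = [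
--     ("error", 0), ("bug", 0), ("fix", 0), ("crash", 0), ("issue", 0), ("fail", 0),
--     ("prefer", 1), ("style", 1), ("convention", 1), ("pattern", 1), ("approach", 1),
--     ("implement", 2), ("code", 2), ("function", 2), ("class", 2), ("module", 2), ("file", 2),
--     ("test", 3), ("spec", 3), ("coverage", 3), ("assert", 3),
--     ("architect", 4), ("design", 4), ("structure", 4), ("pattern", 4), ("layer", 4),
--     ("performance", 5), ("optimize", 5), ("slow", 5), ("fast", 5), ("memory", 5), ("cache", 5),
--     ("doc", 6), ("readme", 6), ("comment", 6), ("explain", 6),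
-- ]
-- CATEGORY_NAMES = ["errors", "preferences", "implementation", "testing",
--                   "architecture", "performance", "documentation", "general"]
--
--
-- def categorize_entry(content: str) -> str:
--     """Categorize a memory entry by its content."""
--     text = content.lower()
--     best = len(CATEGORY_NAMES) - 1  # index of "general"
--     for i in range(len(text)):
--         for kw, pri in KEYWORD_PRIORITY:
--             if text.startswith(kw, i):
--                 best = min(best, pri)
--     return CATEGORY_NAMES[best]
-- ===== Notes on version B (the rewrite author's own statement) =====
-- stated objective: alternative
-- what changed: Instead of A's seven chained category checks each doing a substring-membership test per keyword, B scans the lowered text position by position, tests which keywords start at each position against a flat keyword-to-priority table, keeps the minimum matched priority in a numeric accumulator, and indexes a name table at the end.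
import Mathlib
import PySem

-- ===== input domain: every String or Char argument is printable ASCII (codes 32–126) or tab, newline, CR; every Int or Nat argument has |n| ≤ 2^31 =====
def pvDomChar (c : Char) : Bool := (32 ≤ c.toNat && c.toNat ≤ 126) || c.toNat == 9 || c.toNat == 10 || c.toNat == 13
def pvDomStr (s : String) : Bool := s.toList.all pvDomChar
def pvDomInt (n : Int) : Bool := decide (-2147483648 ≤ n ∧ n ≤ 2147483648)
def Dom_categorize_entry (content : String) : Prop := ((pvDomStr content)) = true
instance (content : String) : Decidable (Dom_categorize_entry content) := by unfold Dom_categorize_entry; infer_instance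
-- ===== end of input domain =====

-- B replaces A's seven chained category checks by a position-by-position scan of the lowered
-- text against a flat keyword-to-priority table, keeping the minimum matched priority; objective: alternative.


-- ===== PORT A =====
def categorize_entry (content : String) : String :=
  let content_lower := PySem.Str.lower content
  if (["error", "bug", "fix", "crash", "issue", "fail"]).any (fun word => PySem.Str.isIn word content_lower) then "errors"
  else if (["prefer", "style", "convention", "pattern", "approach"]).any (fun word => PySem.Str.isIn word content_lower) then "preferences"
  else if (["implement", "code", "function", "class", "module", "file"]).any (fun word => PySem.Str.isIn word content_lower) then "implementation"
  else if (["test", "spec", "coverage", "assert"]).any (fun word => PySem.Str.isIn word content_lower) then "testing"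
  else if (["architect", "design", "structure", "pattern", "layer"]).any (fun word => PySem.Str.isIn word content_lower) then "architecture"
  else if (["performance", "optimize", "slow", "fast", "memory", "cache"]).any (fun word => PySem.Str.isIn word content_lower) then "performance"
  else if (["doc", "readme", "comment", "explain"]).any (fun word => PySem.Str.isIn word content_lower) then "documentation"
  else "general"

-- ===== PORT B =====
-- the flat (keyword, priority) table of Source B, keywords as character lists
def pvKeywordPriority : List (List Char × Nat) :=
  [("error".toList, 0), ("bug".toList, 0), ("fix".toList, 0), ("crash".toList, 0), ("issue".toList, 0), ("fail".toList, 0),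
   ("prefer".toList, 1), ("style".toList, 1), ("convention".toList, 1), ("pattern".toList, 1), ("approach".toList, 1),
   ("implement".toList, 2), ("code".toList, 2), ("function".toList, 2), ("class".toList, 2), ("module".toList, 2), ("file".toList, 2),
   ("test".toList, 3), ("spec".toList, 3), ("coverage".toList, 3), ("assert".toList, 3),
   ("architect".toList, 4), ("design".toList, 4), ("structure".toList, 4), ("pattern".toList, 4), ("layer".toList, 4),
   ("performance".toList, 5), ("optimize".toList, 5), ("slow".toList, 5), ("fast".toList, 5), ("memory".toList, 5), ("cache".toList, 5),
   ("doc".toList, 6), ("readme".toList, 6), ("comment".toList, 6), ("explain".toList, 6)]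

def pvCategoryNames : List String :=
  ["errors", "preferences", "implementation", "testing", "architecture", "performance", "documentation", "general"]

def categorize_entry_alt (content : String) : String :=
  let text := (PySem.Str.lower content).toList
  let best :=
    (PySem.List.pyRange 0 (text.length) 1).foldl
      (fun best i =>
        pvKeywordPriority.foldl
          (fun b kp =>
            -- text.startswith(kw, i): exact for 0 ≤ i, it tests kw against text[i:]
            if PySem.Chars.startswith (text.drop i.toNat) kp.1 then min b kp.2 else b)
          best)
      (pvCategoryNames.length - 1)
  (PySem.List.pyGet? pvCategoryNames (best : Int)).getD ""

-- ===== PRECONDITION & SPEC =====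
def Spec_categorize_entry (content : String) (out : String) : Prop := out = categorize_entry_alt content
instance (content : String) (out : String) : Decidable (Spec_categorize_entry content out) := by unfold Spec_categorize_entry; infer_instance

-- ===== CLAIM (what is proved, stated in full; the proofs are below) =====
def Claim_equal_categorize_entry : Prop := ∀ (content : String), Dom_categorize_entry content → Spec_categorize_entry content (categorize_entry content)

-- ===== LEMMAS AND PROOFS =====
-- A's keyword lists indexed by category priority (proof-side view of B's flat table)
def pvGroups : List (List String) :=
  [["error", "bug", "fix", "crash", "issue", "fail"],
   ["prefer", "style", "convention", "pattern", "approach"],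
   ["implement", "code", "function", "class", "module", "file"],
   ["test", "spec", "coverage", "assert"],
   ["architect", "design", "structure", "pattern", "layer"],
   ["performance", "optimize", "slow", "fast", "memory", "cache"],
   ["doc", "readme", "comment", "explain"]]

-- B's inner-loop accumulator computation, named for the proofs
def pvBest (text : List Char) : Nat :=
  (PySem.List.pyRange 0 (text.length) 1).foldl
    (fun best i =>
      pvKeywordPriority.foldl
        (fun b kp =>
          if PySem.Chars.startswith (text.drop i.toNat) kp.1 then min b kp.2 else b)
        best)
    7

theorem pvAlt_eq (content : String) :
    categorize_entry_alt content =
      (PySem.List.pyGet? pvCategoryNames ((pvBest (PySem.Str.lower content).toList : Nat) : Int)).getD "" := rfl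

theorem pvKeywordPriority_eq_flat :
    pvKeywordPriority =
      (List.range 7).flatMap (fun p => (pvGroups.getD p []).map (fun kw => (kw.toList, p))) := by
  decide

theorem pvKeyword_ne_nil : ∀ kp ∈ pvKeywordPriority, kp.1 ≠ [] := by decide

theorem pvMemKW (kw : List Char) (p : Nat) :
    (kw, p) ∈ pvKeywordPriority ↔ p < 7 ∧ ∃ w ∈ pvGroups.getD p [], w.toList = kw := by
  rw [pvKeywordPriority_eq_flat]
  simp only [List.mem_flatMap, List.mem_range, List.mem_map, Prod.mk.injEq]
  constructor
  · rintro ⟨q, hq, w, hw, rfl, rfl⟩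
    exact ⟨hq, w, hw, rfl⟩
  · rintro ⟨hp, w, hw, rfl⟩
    exact ⟨p, hp, w, hw, rfl, rfl⟩

-- generic spec of a conditional min-fold
theorem pvFoldMinSpec {α : Type} (c : α → Bool) (w : α → Nat) (L : List α) (init : Nat) :
    (L.foldl (fun b x => if c x then min b (w x) else b) init ≤ init) ∧
    (∀ x ∈ L, c x = true → L.foldl (fun b x => if c x then min b (w x) else b) init ≤ w x) ∧
    (L.foldl (fun b x => if c x then min b (w x) else b) init = init ∨
      ∃ x ∈ L, c x = true ∧ w x = L.foldl (fun b x => if c x then min b (w x) else b) init) := by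
  induction L generalizing init with
  | nil => exact ⟨le_refl _, by simp, Or.inl rfl⟩
  | cons a L ih =>
    simp only [List.foldl_cons]
    by_cases hca : c a = true
    · rw [if_pos hca]
      obtain ⟨ih1, ih2, ih3⟩ := ih (min init (w a))
      refine ⟨le_trans ih1 (min_le_left _ _), ?_, ?_⟩
      · intro x hx hcx
        rcases List.mem_cons.mp hx with rfl | hx'
        · exact le_trans ih1 (min_le_right _ _)
        · exact ih2 x hx' hcx
      · rcases ih3 with h | ⟨x, hx, hcx, hwx⟩
        · rcases min_choice init (w a) with hm | hm
          · exact Or.inl (h.trans hm)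
          · exact Or.inr ⟨a, List.mem_cons_self, hca, (h.trans hm).symm⟩
        · exact Or.inr ⟨x, List.mem_cons_of_mem _ hx, hcx, hwx⟩
    · rw [if_neg hca]
      obtain ⟨ih1, ih2, ih3⟩ := ih init
      refine ⟨ih1, ?_, ?_⟩
      · intro x hx hcx
        rcases List.mem_cons.mp hx with rfl | hx'
        · exact absurd hcx hca
        · exact ih2 x hx' hcx
      · rcases ih3 with h | ⟨x, hx, hcx, hwx⟩
        · exact Or.inl h
        · exact Or.inr ⟨x, List.mem_cons_of_mem _ hx, hcx, hwx⟩

-- the nested fold equals a fold over the flattened (position, keyword) pairs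
theorem pvNestedEqFlat (text : List Char) (rng : List Int) (init : Nat) :
    rng.foldl
      (fun best i =>
        pvKeywordPriority.foldl
          (fun b kp => if PySem.Chars.startswith (text.drop i.toNat) kp.1 then min b kp.2 else b)
          best)
      init
    = (rng.flatMap (fun i => pvKeywordPriority.map (fun kp => (i, kp)))).foldl
        (fun b p => if PySem.Chars.startswith (text.drop p.1.toNat) p.2.1 then min b p.2.2 else b)
        init := by
  induction rng generalizing init with
  | nil => rfl
  | cons i rest ih =>
      simp [List.flatMap_cons, List.foldl_append, List.foldl_map, ih]

-- a keyword occurs at some scanned position iff it is a substring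
theorem pvMatchAt (text kw : List Char) (hne : kw ≠ []) :
    (∃ i ∈ PySem.List.pyRange 0 (text.length) 1,
        PySem.Chars.startswith (text.drop i.toNat) kw = true) ↔
      PySem.Chars.isIn kw text = true := by
  constructor
  · rintro ⟨i, hi, hsw⟩
    exact (PySem.Chars.exists_prefix_drop_iff_isIn _ _).mp
      ⟨i.toNat, (PySem.Chars.startswith_iff _ _).mp hsw⟩
  · intro hin
    obtain ⟨j, hj⟩ := (PySem.Chars.exists_prefix_drop_iff_isIn _ _).mpr hin
    have hjlen : j < text.length := by
      by_contra h
      rw [Nat.not_lt] at h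
      rw [List.drop_eq_nil_of_le h] at hj
      exact hne (List.prefix_nil.mp hj)
    refine ⟨(j : Int), ?_, ?_⟩
    · exact PySem.List.mem_pyRange_one.mpr ⟨by positivity, by exact_mod_cast hjlen⟩
    · exact (PySem.Chars.startswith_iff _ _).mpr (by simpa using hj)

theorem pvBest_le (text : List Char) : pvBest text ≤ 7 := by
  unfold pvBest
  rw [pvNestedEqFlat]
  exact (pvFoldMinSpec (fun p : Int × (List Char × Nat) => PySem.Chars.startswith (text.drop p.1.toNat) p.2.1)
    (fun p : Int × (List Char × Nat) => p.2.2) _ 7).1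

theorem pvBest_group (text : List Char) (p : Nat)
    (h : (pvGroups.getD p []).any (fun w => PySem.Chars.isIn w.toList text) = true) :
    pvBest text ≤ p := by
  obtain ⟨w, hw, hin⟩ := List.any_eq_true.mp h
  have hp7 : p < 7 := by
    by_contra hc
    rw [Nat.not_lt] at hc
    rw [List.getD_eq_default] at hw
    · simp at hw
    · simpa using hc
  have hkmem : (w.toList, p) ∈ pvKeywordPriority := (pvMemKW _ _).mpr ⟨hp7, w, hw, rfl⟩
  have hne : w.toList ≠ [] := pvKeyword_ne_nil _ hkmem
  obtain ⟨i, hi, hsw⟩ := (pvMatchAt text w.toList hne).mpr hin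
  unfold pvBest
  rw [pvNestedEqFlat]
  exact (pvFoldMinSpec (fun p : Int × (List Char × Nat) => PySem.Chars.startswith (text.drop p.1.toNat) p.2.1)
    (fun p : Int × (List Char × Nat) => p.2.2) _ 7).2.1 (i, (w.toList, p))
    (List.mem_flatMap.mpr ⟨i, hi, List.mem_map.mpr ⟨(w.toList, p), hkmem, rfl⟩⟩) hsw

theorem pvBest_achieved (text : List Char) :
    pvBest text = 7 ∨
      (pvGroups.getD (pvBest text) []).any (fun w => PySem.Chars.isIn w.toList text) = true := by
  have h3 := (pvFoldMinSpec (fun p : Int × (List Char × Nat) => PySem.Chars.startswith (text.drop p.1.toNat) p.2.1)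
    (fun p : Int × (List Char × Nat) => p.2.2)
    ((PySem.List.pyRange 0 (text.length) 1).flatMap
      (fun i => pvKeywordPriority.map (fun kp => (i, kp)))) 7).2.2
  have hbe : pvBest text =
      ((PySem.List.pyRange 0 (text.length) 1).flatMap
        (fun i => pvKeywordPriority.map (fun kp => (i, kp)))).foldl
        (fun b p => if PySem.Chars.startswith (text.drop p.1.toNat) p.2.1 then min b p.2.2 else b)
        7 := by
    unfold pvBest; rw [pvNestedEqFlat]
  rw [← hbe] at h3
  rcases h3 with h | ⟨x, hx, hcx, hwx⟩
  · exact Or.inl h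
  · obtain ⟨i, hi, hpair⟩ := List.mem_flatMap.mp hx
    obtain ⟨kp, hkp, rfl⟩ := List.mem_map.mp hpair
    obtain ⟨hq7, w, hw, hwl⟩ := (pvMemKW kp.1 kp.2).mp hkp
    refine Or.inr (List.any_eq_true.mpr ⟨w, ?_, ?_⟩)
    · exact hwx ▸ hw
    · refine (pvMatchAt text w.toList (by rw [hwl]; exact pvKeyword_ne_nil _ hkp)).mp ?_
      exact ⟨i, hi, by rw [hwl]; exact hcx⟩

-- ===== VERDICT (by name: the statement is the Claim_ definition above) =====
theorem categorize_entry_spec : Claim_equal_categorize_entry := by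
  intro content _
  show categorize_entry content = categorize_entry_alt content
  rw [pvAlt_eq]
  simp only [categorize_entry, PySem.Str.isIn_eq]
  set text := (PySem.Str.lower content).toList with htext
  have hle := pvBest_le text
  have hach := pvBest_achieved text
  set r := pvBest text with hb
  by_cases h0 : (["error", "bug", "fix", "crash", "issue", "fail"] : List String).any
      (fun word => PySem.Chars.isIn word.toList text) = true
  · rw [if_pos h0]
    have hr : r ≤ 0 := pvBest_group text 0 (by simpa [pvGroups] using h0)
    have : r = 0 := by omega
    rw [this]; rfl
  · rw [if_neg h0]
    by_cases h1 : (["prefer", "style", "convention", "pattern", "approach"] : List String).any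
        (fun word => PySem.Chars.isIn word.toList text) = true
    · rw [if_pos h1]
      have hr : r ≤ 1 := pvBest_group text 1 (by simpa [pvGroups] using h1)
      have : r = 1 := by
        interval_cases r
        · rcases hach with h | h
          · omega
          · exact absurd (by simpa [pvGroups] using h) h0
        · rfl
      rw [this]; rfl
    · rw [if_neg h1]
      by_cases h2 : (["implement", "code", "function", "class", "module", "file"] : List String).any
          (fun word => PySem.Chars.isIn word.toList text) = true
      · rw [if_pos h2]
        have hr : r ≤ 2 := pvBest_group text 2 (by simpa [pvGroups] using h2)
        have : r = 2 := by
          interval_cases r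
          · rcases hach with h | h
            · omega
            · exact absurd (by simpa [pvGroups] using h) h0
          · rcases hach with h | h
            · omega
            · exact absurd (by simpa [pvGroups] using h) h1
          · rfl
        rw [this]; rfl
      · rw [if_neg h2]
        by_cases h3 : (["test", "spec", "coverage", "assert"] : List String).any
            (fun word => PySem.Chars.isIn word.toList text) = true
        · rw [if_pos h3]
          have hr : r ≤ 3 := pvBest_group text 3 (by simpa [pvGroups] using h3)
          have : r = 3 := by
            interval_cases r
            · rcases hach with h | h
              · omega
              · exact absurd (by simpa [pvGroups] using h) h0
            · rcases hach with h | h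
              · omega
              · exact absurd (by simpa [pvGroups] using h) h1
            · rcases hach with h | h
              · omega
              · exact absurd (by simpa [pvGroups] using h) h2
            · rfl
          rw [this]; rfl
        · rw [if_neg h3]
          by_cases h4 : (["architect", "design", "structure", "pattern", "layer"] : List String).any
              (fun word => PySem.Chars.isIn word.toList text) = true
          · rw [if_pos h4]
            have hr : r ≤ 4 := pvBest_group text 4 (by simpa [pvGroups] using h4)
            have : r = 4 := by
              interval_cases r
              · rcases hach with h | h
                · omega
                · exact absurd (by simpa [pvGroups] using h) h0
              · rcases hach with h | h
                · omega
                · exact absurd (by simpa [pvGroups] using h) h1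
              · rcases hach with h | h
                · omega
                · exact absurd (by simpa [pvGroups] using h) h2
              · rcases hach with h | h
                · omega
                · exact absurd (by simpa [pvGroups] using h) h3
              · rfl
            rw [this]; rfl
          · rw [if_neg h4]
            by_cases h5 : (["performance", "optimize", "slow", "fast", "memory", "cache"] : List String).any
                (fun word => PySem.Chars.isIn word.toList text) = true
            · rw [if_pos h5]
              have hr : r ≤ 5 := pvBest_group text 5 (by simpa [pvGroups] using h5)
              have : r = 5 := by
                interval_cases r
                · rcases hach with h | h
                  · omega
                  · exact absurd (by simpa [pvGroups] using h) h0
                · rcases hach with h | h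
                  · omega
                  · exact absurd (by simpa [pvGroups] using h) h1
                · rcases hach with h | h
                  · omega
                  · exact absurd (by simpa [pvGroups] using h) h2
                · rcases hach with h | h
                  · omega
                  · exact absurd (by simpa [pvGroups] using h) h3
                · rcases hach with h | h
                  · omega
                  · exact absurd (by simpa [pvGroups] using h) h4
                · rfl
              rw [this]; rfl
            · rw [if_neg h5]
              by_cases h6 : (["doc", "readme", "comment", "explain"] : List String).any
                  (fun word => PySem.Chars.isIn word.toList text) = true
              · rw [if_pos h6]
                have hr : r ≤ 6 := pvBest_group text 6 (by simpa [pvGroups] using h6)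
                have : r = 6 := by
                  interval_cases r
                  · rcases hach with h | h
                    · omega
                    · exact absurd (by simpa [pvGroups] using h) h0
                  · rcases hach with h | h
                    · omega
                    · exact absurd (by simpa [pvGroups] using h) h1
                  · rcases hach with h | h
                    · omega
                    · exact absurd (by simpa [pvGroups] using h) h2
                  · rcases hach with h | h
                    · omega
                    · exact absurd (by simpa [pvGroups] using h) h3
                  · rcases hach with h | h
                    · omega
                    · exact absurd (by simpa [pvGroups] using h) h4
                  · rcases hach with h | h
                    · omega
                    · exact absurd (by simpa [pvGroups] using h) h5
                  · rfl
                rw [this]; rfl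
              · rw [if_neg h6]
                have : r = 7 := by
                  interval_cases r
                  · rcases hach with h | h
                    · omega
                    · exact absurd (by simpa [pvGroups] using h) h0
                  · rcases hach with h | h
                    · omega
                    · exact absurd (by simpa [pvGroups] using h) h1
                  · rcases hach with h | h
                    · omega
                    · exact absurd (by simpa [pvGroups] using h) h2
                  · rcases hach with h | h
                    · omega
                    · exact absurd (by simpa [pvGroups] using h) h3
                  · rcases hach with h | h
                    · omega
                    · exact absurd (by simpa [pvGroups] using h) h4
                  · rcases hach with h | h
                    · omega
                    · exact absurd (by simpa [pvGroups] using h) h5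
                  · rcases hach with h | h
                    · omega
                    · exact absurd (by simpa [pvGroups] using h) h6
                  · rfl
                rw [this]; rfl
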